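-- pv_equiv track=rewrite | github.com/ICESAT-2HackWeek/ICESat2_hackweek_tutorials | 04_HDF5AndICESat2Data_Paolo/notebooks/data/.local/lib/python2.7/site-packages/matlab/_internal/mlarray_utils.py | _get_mlsize
-- ===== SOURCE A (Python) =====
-- def _get_mlsize(size):
--     if not hasattr(size, '__getitem__'):
--         raise TypeError("invalid size")
--     if len(size) == 0:
--         raise ValueError("size cannot be empty")
--     if len(size) == 2:
--         return size
--     if len(size) == 1:
--         return 1, size[0]
--     if size[-1] != 1:
--         return size
--     return _get_mlsize(size[:-1])
-- ===== SOURCE B (Python) =====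
-- def _get_mlsize(size):
--     if not hasattr(size, '__getitem__'):
--         raise TypeError("invalid size")
--     n = len(size)
--     if n == 0:
--         raise ValueError("size cannot be empty")
--     if n == 1:
--         return 1, size[0]
--     t = 0
--     for v in reversed(size):
--         if v != 1:
--             break
--         t += 1
--     return size[:max(2, n - t)]
-- ===== Notes on version B (the rewrite author's own statement) =====
-- stated objective: simpler
-- what changed: Instead of recursively re-slicing the tuple one element at a time, B counts the trailing run of 1s in one backward pass and returns a single slice size[:max(2, n-t)] (with the length-1 case handled up front).
import Mathlib
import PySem

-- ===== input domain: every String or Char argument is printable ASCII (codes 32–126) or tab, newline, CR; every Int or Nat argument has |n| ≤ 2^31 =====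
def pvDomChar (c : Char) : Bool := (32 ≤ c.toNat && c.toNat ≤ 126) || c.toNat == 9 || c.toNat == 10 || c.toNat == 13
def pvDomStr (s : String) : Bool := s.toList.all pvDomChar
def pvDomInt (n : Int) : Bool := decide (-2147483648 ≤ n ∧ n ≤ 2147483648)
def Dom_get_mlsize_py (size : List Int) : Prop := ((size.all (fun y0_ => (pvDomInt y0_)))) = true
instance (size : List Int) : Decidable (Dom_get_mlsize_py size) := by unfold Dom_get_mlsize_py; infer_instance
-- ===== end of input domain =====

-- B replaces A's tail recursion (one slice per stripped trailing 1) by a single backward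
-- pass counting trailing 1s followed by one slice; objective: simpler.


-- ===== PORT A =====
-- literal port of Source A: len==2 / len==1 / last≠1 branches in order, then recursion on size[:-1]
def get_mlsize_py (size : List Int) : List Int :=
  if size.length = 2 then size
  else if size.length = 1 then [1, PySem.List.pyGetD size 0 0]
  else if PySem.List.pyGetD size (-1) 0 ≠ 1 then size
  else get_mlsize_py (PySem.List.slice size none (some (-1)))
termination_by size.length
decreasing_by
  rw [PySem.List.slice_to_neg_one]
  rcases size with _ | ⟨x, xs⟩
  · simp_all [PySem.List.pyGetD, PySem.List.pyGet?]
  · simp [List.length_dropLast]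
-- ===== PORT B =====
-- literal port of Source B: n==1 up front; t counts the trailing run of 1s (the reversed-for
-- with break IS the length of reverse.takeWhile); then one slice size[:max(2, n-t)]
def get_mlsize_py_alt (size : List Int) : List Int :=
  if size.length = 1 then [1, PySem.List.pyGetD size 0 0]
  else
    PySem.List.slice size none
      (some ((max 2 (size.length - (size.reverse.takeWhile (fun v => v == 1)).length) : Nat) : Int))

-- ===== PRECONDITION & SPEC =====
-- Pre_ excludes exactly the inputs where A raises: the empty size (ValueError)
def Pre_get_mlsize_py (size : List Int) : Prop := size ≠ []
instance (size : List Int) : Decidable (Pre_get_mlsize_py size) := by unfold Pre_get_mlsize_py; infer_instance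
def pvWitness_get_mlsize_py : List Int := [5, 1, 1]

def Spec_get_mlsize_py (size : List Int) (out : List Int) : Prop := out = get_mlsize_py_alt size
instance (size : List Int) (out : List Int) : Decidable (Spec_get_mlsize_py size out) := by unfold Spec_get_mlsize_py; infer_instance

-- ===== CLAIM (what is proved, stated in full; the proofs are below) =====
def Claim_equal_get_mlsize_py : Prop := ∀ (size : List Int), Dom_get_mlsize_py size → Pre_get_mlsize_py size → Spec_get_mlsize_py size (get_mlsize_py size)

-- ===== LEMMAS AND PROOFS =====

-- B's slice written as List.take (the n ≠ 1 branch)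
lemma alt_eq (xs : List Int) (h : xs.length ≠ 1) :
    get_mlsize_py_alt xs
      = xs.take (max 2 (xs.length - (xs.reverse.takeWhile (fun v => v == (1:Int))).length)) := by
  unfold get_mlsize_py_alt
  rw [if_neg h, PySem.List.slice_to_natCast]

lemma tOnes_le (xs : List Int) : (xs.takeWhile (fun v => v == (1:Int))).length ≤ xs.length :=
  List.IsPrefix.length_le (List.takeWhile_prefix _)

lemma main_eq (xs : List Int) (hne : xs ≠ []) :
    get_mlsize_py xs = get_mlsize_py_alt xs := by
  induction xs using List.reverseRecOn with
  | nil => exact absurd rfl hne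
  | append_singleton ys a ih =>
    rcases Nat.lt_or_ge ys.length 2 with hlt | hge
    · rcases ys with _ | ⟨y, _ | ⟨z, zs⟩⟩
      · -- length 1: both return [1, x0]
        simp [get_mlsize_py, get_mlsize_py_alt]
      · -- length 2: A returns size; B takes max 2 _ ≥ length elements
        unfold get_mlsize_py
        rw [if_pos (by simp), alt_eq _ (by simp)]
        exact (List.take_of_length_le (by simp)).symm
      · exfalso; simp at hlt
    · -- length ≥ 3
      have hl1 : (ys ++ [a]).length ≠ 1 := by
        simp only [List.length_append, List.length_singleton]; omega
      have hl2 : (ys ++ [a]).length ≠ 2 := by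
        simp only [List.length_append, List.length_singleton]; omega
      by_cases ha : a = 1
      · subst ha
        -- A strips the last 1 and recurses; B's count sees one more trailing 1
        unfold get_mlsize_py
        rw [if_neg hl2, if_neg hl1,
          if_neg (by simp [PySem.List.pyGetD_neg_one_append_singleton]),
          PySem.List.slice_to_neg_one, List.dropLast_concat,
          ih (by intro h; simp [h] at hge),
          alt_eq _ (by omega), alt_eq _ hl1]
        simp only [List.reverse_append, List.reverse_singleton, List.singleton_append,
          List.takeWhile_cons, List.length_append, List.length_singleton]
        norm_num
        have hk : ys.length + 1 - ((ys.reverse.takeWhile (fun v => v == (1:Int))).length + 1)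
            = ys.length - (ys.reverse.takeWhile (fun v => v == (1:Int))).length := by omega
        rw [hk, List.take_append_of_le_length]
        have := tOnes_le ys.reverse
        rw [List.length_reverse] at this
        exact Nat.max_le.mpr ⟨hge, Nat.sub_le _ _⟩
      · -- last ≠ 1: both return size unchanged
        unfold get_mlsize_py
        rw [if_neg hl2, if_neg hl1,
          if_pos (by rw [PySem.List.pyGetD_neg_one_append_singleton]; exact ha),
          alt_eq _ hl1]
        have ht : ((ys ++ [a]).reverse.takeWhile (fun v => v == (1:Int))) = [] := by
          simp [List.reverse_append, ha]
        rw [ht]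
        simp only [List.length_nil, Nat.sub_zero]
        exact (List.take_of_length_le (le_max_right _ _)).symm

-- ===== VERDICT (by name: the statement is the Claim_ definition above) =====
theorem get_mlsize_py_spec : Claim_equal_get_mlsize_py := by
  intro size _ hpre
  exact main_eq size hpre
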